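-- pv_equiv track=rewrite | github.com/reymonzakhary/print | microservices/search/search/services/options_redisearch_service.py | _normalize_sku_across_translations
-- ===== SOURCE A (Python) =====
-- def _normalize_sku_across_translations(items):
--     """Ensure stable sku per linked group (prefer 'en' variant's sku if available)."""
--     grouped = {}
--     for it in items:
--         lk = it.get("linked")
--         if not lk:
--             continue
--         grouped.setdefault(lk, []).append(it)
--
--     for lk, group in grouped.items():
--         canonical = None
--         fallback = None
--         for it in group:
--             if not fallback and it.get("sku"):
--                 fallback = it.get("sku")
--             if 'en' in it and it.get("sku"):
--                 canonical = it.get("sku")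
--                 break
--         canonical_sku = canonical or fallback
--         if canonical_sku:
--             for it in group:
--                 it["sku"] = canonical_sku
--     return items
-- ===== SOURCE B (Python) =====
-- def _normalize_sku_across_translations(items):
--     """Ensure stable sku per linked group (prefer 'en' variant's sku if available)."""
--     canon = {}
--     locked = set()
--     for it in items:
--         lk = it.get("linked")
--         if not lk or lk in locked:
--             continue
--         sku = it.get("sku")
--         if sku and "en" in it:
--             canon[lk] = sku
--             locked.add(lk)
--         elif sku and lk not in canon:
--             canon[lk] = sku
--     for it in items:
--         lk = it.get("linked")
--         if lk and canon.get(lk):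
--             it["sku"] = canon[lk]
--     return items
-- ===== Notes on version B (the rewrite author's own statement) =====
-- stated objective: simpler
-- what changed: Replaces A's intermediate dict of per-group item lists and per-group rescans with two flat passes: one pass builds a single canonical-sku-per-group dict (locking in the first 'en' sku, otherwise keeping the first truthy sku), a second pass assigns it.
import Mathlib
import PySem

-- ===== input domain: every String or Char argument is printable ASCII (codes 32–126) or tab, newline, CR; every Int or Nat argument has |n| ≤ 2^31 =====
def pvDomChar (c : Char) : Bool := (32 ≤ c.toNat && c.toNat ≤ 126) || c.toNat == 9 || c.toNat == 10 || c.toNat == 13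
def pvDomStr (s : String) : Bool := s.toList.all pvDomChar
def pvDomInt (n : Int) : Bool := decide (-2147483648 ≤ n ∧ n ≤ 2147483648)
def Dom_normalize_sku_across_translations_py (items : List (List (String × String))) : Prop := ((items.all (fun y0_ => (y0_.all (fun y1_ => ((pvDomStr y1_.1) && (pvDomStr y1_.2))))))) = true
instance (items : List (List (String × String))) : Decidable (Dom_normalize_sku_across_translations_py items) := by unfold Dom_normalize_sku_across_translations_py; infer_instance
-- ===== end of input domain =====

-- B replaces A's dict of per-group item lists (build groups, then rescan each group) by two flat
-- passes with a single canonical-sku dict; objective: simpler. Both Pythons mutate the items in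
-- place and return the same list; the equivalence proved here is about the returned value.

-- ===== PORT A =====
-- inner scan of one group: computes (canonical, fallback) with A's early break
def pvScanA : List (List (String × String)) → Option String → Option String → Option String × Option String
  | [], canonical, fallback => (canonical, fallback)
  | it :: rest, canonical, fallback =>
    let sku := (PySem.Dict.mk it).getD "sku" ""
    let fallback' := if fallback.getD "" = "" ∧ sku ≠ "" then some sku else fallback
    if (PySem.Dict.mk it).contains "en" ∧ sku ≠ "" then (some sku, fallback')
    else pvScanA rest canonical fallback'

-- A mutates each item of a group through shared references; here the per-group assignment
-- is rendered as updating exactly the items whose "linked" key equals the group's key.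
def normalize_sku_across_translations_py (items : List (List (String × String))) : List (List (String × String)) :=
  let grouped : PySem.Dict String (List (List (String × String))) :=
    items.foldl (fun g it =>
      let lk := (PySem.Dict.mk it).getD "linked" ""
      if lk = "" then g else g.modify lk [] (· ++ [it])) PySem.Dict.empty
  grouped.items.foldl (fun acc p =>
    let cf := pvScanA p.2 none none
    let canonical_sku := if cf.1.getD "" ≠ "" then cf.1 else cf.2
    if canonical_sku.getD "" ≠ "" then
      acc.map (fun it =>
        if (PySem.Dict.mk it).getD "linked" "" = p.1 then
          ((PySem.Dict.mk it).insert "sku" (canonical_sku.getD "")).items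
        else it)
    else acc) items

-- ===== PORT B =====
def normalize_sku_across_translations_py_alt (items : List (List (String × String))) : List (List (String × String)) :=
  let st := items.foldl (fun (st : PySem.Dict String String × PySem.Set String) it =>
    let lk := (PySem.Dict.mk it).getD "linked" ""
    if lk = "" ∨ PySem.Set.contains st.2 lk then st
    else
      let sku := (PySem.Dict.mk it).getD "sku" ""
      if sku ≠ "" ∧ (PySem.Dict.mk it).contains "en" then (st.1.insert lk sku, PySem.Set.add st.2 lk)
      else if sku ≠ "" ∧ st.1.contains lk = false then (st.1.insert lk sku, st.2)
      else st) (PySem.Dict.empty, PySem.Set.empty)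
  items.map (fun it =>
    let lk := (PySem.Dict.mk it).getD "linked" ""
    if lk ≠ "" ∧ st.1.getD lk "" ≠ "" then
      ((PySem.Dict.mk it).insert "sku" (st.1.getD lk "")).items
    else it)

-- ===== PRECONDITION & SPEC =====
def Spec_normalize_sku_across_translations_py (items : List (List (String × String))) (out : List (List (String × String))) : Prop := out = normalize_sku_across_translations_py_alt items
instance (items : List (List (String × String))) (out : List (List (String × String))) : Decidable (Spec_normalize_sku_across_translations_py items out) := by unfold Spec_normalize_sku_across_translations_py; infer_instance

-- ===== CLAIM (what is proved, stated in full; the proofs are below) =====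
def Claim_equal_normalize_sku_across_translations_py : Prop := ∀ (items : List (List (String × String))), Dom_normalize_sku_across_translations_py items → Spec_normalize_sku_across_translations_py items (normalize_sku_across_translations_py items)

-- ===== LEMMAS AND PROOFS =====

-- shared vocabulary for the proofs
def pvLinked (it : List (String × String)) : String := (PySem.Dict.mk it).getD "linked" ""
def pvSkuOf (it : List (String × String)) : String := (PySem.Dict.mk it).getD "sku" ""
def pvSetSku (it : List (String × String)) (v : String) : List (String × String) :=
  ((PySem.Dict.mk it).insert "sku" v).items
def pvGroup (items : List (List (String × String))) (lk : String) : List (List (String × String)) :=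
  items.filter (fun it => pvLinked it = lk)
-- canonical-or-fallback sku of one group, as A computes it
def pvCSg (g : List (List (String × String))) : String :=
  if (pvScanA g none none).1.getD "" ≠ "" then (pvScanA g none none).1.getD ""
  else (pvScanA g none none).2.getD ""
def pvCS (items : List (List (String × String))) (lk : String) : String := pvCSg (pvGroup items lk)
-- the common per-item result both programs produce
def pvF (items : List (List (String × String))) (it : List (String × String)) : List (String × String) :=
  if pvLinked it ≠ "" ∧ pvCS items (pvLinked it) ≠ "" then pvSetSku it (pvCS items (pvLinked it)) else it

theorem pvCS_def (items : List (List (String × String))) (lk : String) :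
    pvCS items lk = pvCSg (pvGroup items lk) := rfl

theorem pvLinked_setSku (it : List (String × String)) (v : String) :
    pvLinked (pvSetSku it v) = pvLinked it := by
  show (PySem.Dict.mk ((PySem.Dict.mk it).insert "sku" v).items).getD "linked" "" = _
  exact PySem.Dict.getD_insert_of_ne (PySem.Dict.mk it) v "" (by decide)

-- ========== A side ==========

-- named copies of A's two loop bodies (definitionally the lambdas in the port)
def pvStepG (g : PySem.Dict String (List (List (String × String)))) (it : List (String × String)) :
    PySem.Dict String (List (List (String × String))) :=
  if pvLinked it = "" then g else g.modify (pvLinked it) [] (· ++ [it])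

def pvStepA (acc : List (List (String × String))) (p : String × List (List (String × String))) :
    List (List (String × String)) :=
  if (if (pvScanA p.2 none none).1.getD "" ≠ "" then (pvScanA p.2 none none).1
      else (pvScanA p.2 none none).2).getD "" ≠ "" then
    acc.map (fun it =>
      if pvLinked it = p.1 then
        pvSetSku it ((if (pvScanA p.2 none none).1.getD "" ≠ "" then (pvScanA p.2 none none).1
                      else (pvScanA p.2 none none).2).getD "")
      else it)
  else acc

def pvGrouped (items : List (List (String × String))) : PySem.Dict String (List (List (String × String))) :=
  items.foldl pvStepG PySem.Dict.empty

theorem pvA_unfold (items : List (List (String × String))) :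
    normalize_sku_across_translations_py items = (pvGrouped items).items.foldl pvStepA items := rfl

def pvPairs (items : List (List (String × String))) : List (String × List (String × String)) :=
  items.filterMap (fun it => if pvLinked it = "" then none else some (pvLinked it, it))

theorem pvGroupedFold_eq (items : List (List (String × String)))
    (d : PySem.Dict String (List (List (String × String)))) :
    items.foldl pvStepG d = (pvPairs items).foldl (fun g p => g.modify p.1 [] (· ++ [p.2])) d := by
  induction items generalizing d with
  | nil => rfl
  | cons it rest ih =>
      rw [List.foldl_cons]
      by_cases h : pvLinked it = ""
      · have e0 : pvStepG d it = d := by unfold pvStepG; rw [if_pos h]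
        rw [e0, ih]
        simp [pvPairs, h]
      · have e0 : pvStepG d it = d.modify (pvLinked it) [] (· ++ [it]) := by
          unfold pvStepG; rw [if_neg h]
        rw [e0, ih]
        simp [pvPairs, h]

theorem pvPairs_filter (items : List (List (String × String))) (lk : String) (hlk : lk ≠ "") :
    ((pvPairs items).filter (fun p => p.1 == lk)).map (fun p => p.2) = pvGroup items lk := by
  induction items with
  | nil => rfl
  | cons it rest ih =>
      by_cases h : pvLinked it = ""
      · have hne : pvLinked it ≠ lk := by rw [h]; exact fun e => hlk e.symm
        have e1 : pvPairs (it :: rest) = pvPairs rest := by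
          unfold pvPairs; rw [List.filterMap_cons, if_pos h]
        rw [e1, ih]
        unfold pvGroup
        rw [List.filter_cons, if_neg (by simpa using hne)]
      · have e1 : pvPairs (it :: rest) = (pvLinked it, it) :: pvPairs rest := by
          unfold pvPairs; rw [List.filterMap_cons, if_neg h]
        rw [e1, List.filter_cons]
        by_cases h2 : pvLinked it = lk
        · rw [if_pos (by simpa using h2), List.map_cons, ih]
          unfold pvGroup
          rw [List.filter_cons, if_pos (by simpa using h2)]
        · rw [if_neg (by simpa using h2), ih]
          unfold pvGroup
          rw [List.filter_cons, if_neg (by simpa using h2)]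

theorem pvGrouped_getD (items : List (List (String × String))) (lk : String) (hlk : lk ≠ "") :
    (pvGrouped items).getD lk [] = pvGroup items lk := by
  unfold pvGrouped
  rw [pvGroupedFold_eq, PySem.Dict.getD_foldl_modify_append, PySem.Dict.getD_empty, List.nil_append]
  exact pvPairs_filter items lk hlk

theorem pvGrouped_keys (items : List (List (String × String))) :
    (pvGrouped items).keys = PySem.Set.ofList ((pvPairs items).map Prod.fst) := by
  unfold pvGrouped
  rw [pvGroupedFold_eq]
  rw [PySem.Dict.keys_foldl_modify_key (pvPairs items) Prod.fst [] (fun _ p => (· ++ [p.2]))]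
  rw [PySem.Set.ofList_eq_foldl]
  rfl

theorem pvGrouped_keys_nodup (items : List (List (String × String))) :
    (pvGrouped items).keys.Nodup := by
  rw [pvGrouped_keys]; exact PySem.Set.nodup_ofList _

theorem pvMem_pairs_fst (items : List (List (String × String))) (lk : String) :
    lk ∈ (pvPairs items).map Prod.fst ↔ (lk ≠ "" ∧ ∃ it ∈ items, pvLinked it = lk) := by
  simp only [pvPairs, List.map_filterMap, List.mem_filterMap]
  constructor
  · rintro ⟨it, hmem, hopt⟩
    by_cases h : pvLinked it = ""
    · rw [h] at hopt; simp at hopt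
    · rw [if_neg h] at hopt
      simp only [Option.map_some] at hopt
      have hlk : pvLinked it = lk := by injection hopt
      exact ⟨by rw [← hlk]; exact h, it, hmem, hlk⟩
  · rintro ⟨hne, it, hmem, hlk⟩
    refine ⟨it, hmem, ?_⟩
    rw [hlk, if_neg hne]
    rfl

theorem pvStepA_eq (acc : List (List (String × String)))
    (p : String × List (List (String × String))) :
    pvStepA acc p = if pvCSg p.2 ≠ "" then
        acc.map (fun it => if pvLinked it = p.1 then pvSetSku it (pvCSg p.2) else it)
      else acc := by
  unfold pvStepA pvCSg
  by_cases h : (pvScanA p.2 none none).1.getD "" ≠ "" <;> simp [h]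

theorem pvFoldA (items : List (List (String × String)))
    (G : List (String × List (List (String × String))))
    (hnd : (G.map Prod.fst).Nodup)
    (hG : ∀ p ∈ G, p.1 ≠ "" ∧ p.2 = pvGroup items p.1)
    (acc : List (List (String × String))) :
    G.foldl pvStepA acc
    = acc.map (fun it =>
        if pvLinked it ∈ G.map Prod.fst ∧ pvCS items (pvLinked it) ≠ "" then
          pvSetSku it (pvCS items (pvLinked it)) else it) := by
  induction G generalizing acc with
  | nil => simp
  | cons p G' ih =>
      obtain ⟨hp1, hp2⟩ := hG p (List.mem_cons_self)
      have hnd' : (G'.map Prod.fst).Nodup := (List.nodup_cons.mp hnd).2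
      have hnotin : p.1 ∉ G'.map Prod.fst := (List.nodup_cons.mp hnd).1
      have hG' : ∀ q ∈ G', q.1 ≠ "" ∧ q.2 = pvGroup items q.1 :=
        fun q hq => hG q (List.mem_cons_of_mem _ hq)
      rw [List.foldl_cons, ih hnd' hG', pvStepA_eq, hp2, ← pvCS_def items p.1]
      by_cases hx : pvCS items p.1 ≠ ""
      · rw [if_pos hx, List.map_map]
        apply List.map_congr_left
        intro it _
        simp only [Function.comp_apply, List.map_cons, List.mem_cons]
        by_cases hl : pvLinked it = p.1
        · rw [if_pos hl]
          rw [if_neg (by rw [pvLinked_setSku]; rintro ⟨h1, _⟩; rw [hl] at h1; exact hnotin h1)]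
          rw [if_pos ⟨Or.inl hl, by rw [hl]; exact hx⟩, hl]
        · rw [if_neg hl]
          by_cases hm : pvLinked it ∈ G'.map Prod.fst ∧ pvCS items (pvLinked it) ≠ ""
          · rw [if_pos hm, if_pos ⟨Or.inr hm.1, hm.2⟩]
          · rw [if_neg hm, if_neg (by rintro ⟨h1 | h1, h2⟩; exact hl h1; exact hm ⟨h1, h2⟩)]
      · rw [if_neg hx]
        apply List.map_congr_left
        intro it _
        simp only [List.map_cons, List.mem_cons]
        by_cases hl : pvLinked it = p.1
        · rw [if_neg (fun hc => hx (hl ▸ hc.2)), if_neg ?_]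
          rintro ⟨h1 | h1, h2⟩
          · exact hx (h1 ▸ h2)
          · exact hnotin (hl ▸ h1)
        · by_cases hm : pvLinked it ∈ G'.map Prod.fst ∧ pvCS items (pvLinked it) ≠ ""
          · rw [if_pos hm, if_pos ⟨Or.inr hm.1, hm.2⟩]
          · rw [if_neg hm, if_neg ?_]
            rintro ⟨h1 | h1, h2⟩
            · exact hl h1
            · exact hm ⟨h1, h2⟩

theorem pvA_eq_specmap (items : List (List (String × String))) :
    normalize_sku_across_translations_py items = items.map (pvF items) := by
  rw [pvA_unfold]
  have hnd := pvGrouped_keys_nodup items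
  have hitems := PySem.Dict.items_eq_map_keys (pvGrouped items) hnd []
  have hfst : ((pvGrouped items).items.map Prod.fst) = (pvGrouped items).keys := by
    rw [hitems, List.map_map]
    simp [Function.comp_def]
  have hGnd : ((pvGrouped items).items.map Prod.fst).Nodup := by rw [hfst]; exact hnd
  have hG : ∀ p ∈ (pvGrouped items).items, p.1 ≠ "" ∧ p.2 = pvGroup items p.1 := by
    rintro ⟨k, v⟩ hp
    have hk : k ∈ (pvGrouped items).keys := by
      rw [← hfst]; exact List.mem_map_of_mem hp
    have hne : k ≠ "" := by
      rw [pvGrouped_keys, PySem.Set.mem_ofList, pvMem_pairs_fst] at hk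
      exact hk.1
    refine ⟨hne, ?_⟩
    have hv := PySem.Dict.getD_of_mem_items (pvGrouped items) hp hnd []
    show v = pvGroup items k
    rw [← hv]
    exact pvGrouped_getD items k hne
  rw [pvFoldA items (pvGrouped items).items hGnd hG items]
  apply List.map_congr_left
  intro it hmem
  unfold pvF
  by_cases h0 : pvLinked it = ""
  · rw [if_neg, if_neg]
    · rintro ⟨h1, _⟩; exact h1 h0
    · rintro ⟨h1, _⟩
      rw [hfst, pvGrouped_keys, PySem.Set.mem_ofList, pvMem_pairs_fst] at h1
      exact h1.1 h0
  · have hmemk : pvLinked it ∈ ((pvGrouped items).items.map Prod.fst) := by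
      rw [hfst, pvGrouped_keys, PySem.Set.mem_ofList, pvMem_pairs_fst]
      exact ⟨h0, it, hmem, rfl⟩
    by_cases hcs : pvCS items (pvLinked it) ≠ ""
    · rw [if_pos ⟨hmemk, hcs⟩, if_pos ⟨h0, hcs⟩]
    · rw [if_neg (by rintro ⟨_, h2⟩; exact hcs h2), if_neg (by rintro ⟨_, h2⟩; exact hcs h2)]

-- ========== B side ==========

-- named copy of B's first-pass loop body (definitionally the lambda in the port)
def pvStepB (st : PySem.Dict String String × PySem.Set String) (it : List (String × String)) :
    PySem.Dict String String × PySem.Set String :=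
  if pvLinked it = "" ∨ PySem.Set.contains st.2 (pvLinked it) then st
  else if pvSkuOf it ≠ "" ∧ (PySem.Dict.mk it).contains "en" then
    (st.1.insert (pvLinked it) (pvSkuOf it), PySem.Set.add st.2 (pvLinked it))
  else if pvSkuOf it ≠ "" ∧ st.1.contains (pvLinked it) = false then
    (st.1.insert (pvLinked it) (pvSkuOf it), st.2)
  else st

theorem pvB_unfold (items : List (List (String × String))) :
    normalize_sku_across_translations_py_alt items
    = items.map (fun it =>
        let lk := (PySem.Dict.mk it).getD "linked" ""
        if lk ≠ "" ∧ (items.foldl pvStepB (PySem.Dict.empty, PySem.Set.empty)).1.getD lk "" ≠ "" then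
          ((PySem.Dict.mk it).insert "sku" ((items.foldl pvStepB (PySem.Dict.empty, PySem.Set.empty)).1.getD lk "")).items
        else it) := rfl

-- the effect of B's first pass on one key, replayed item by item
def pvRun (lk : String) : List (List (String × String)) → Bool → String → Bool × String
  | [], locked, v => (locked, v)
  | it :: rest, locked, v =>
    if pvLinked it ≠ lk then pvRun lk rest locked v
    else if locked then pvRun lk rest locked v
    else if pvSkuOf it ≠ "" ∧ (PySem.Dict.mk it).contains "en" then pvRun lk rest true (pvSkuOf it)
    else if pvSkuOf it ≠ "" ∧ v = "" then pvRun lk rest false (pvSkuOf it)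
    else pvRun lk rest locked v

theorem pvRun_locked (lk : String) (l : List (List (String × String))) (v : String) :
    pvRun lk l true v = (true, v) := by
  induction l with
  | nil => rfl
  | cons it rest ih => by_cases h : pvLinked it ≠ lk <;> simp [pvRun, h, ih]

theorem pvRun_cons (lk : String) (it : List (String × String))
    (rest : List (List (String × String))) (locked : Bool) (v : String) :
    pvRun lk (it :: rest) locked v
    = (if pvLinked it ≠ lk then pvRun lk rest locked v
       else if locked then pvRun lk rest locked v
       else if pvSkuOf it ≠ "" ∧ (PySem.Dict.mk it).contains "en" then pvRun lk rest true (pvSkuOf it)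
       else if pvSkuOf it ≠ "" ∧ v = "" then pvRun lk rest false (pvSkuOf it)
       else pvRun lk rest locked v) := rfl

theorem pvStepB_run (it : List (String × String))
    (canon : PySem.Dict String String) (locked : PySem.Set String)
    (hW : ∀ k, canon.contains k = decide (canon.getD k "" ≠ "")) :
    (∀ k, (pvStepB (canon, locked) it).1.contains k
            = decide ((pvStepB (canon, locked) it).1.getD k "" ≠ "")) ∧
    ∀ lk rest, lk ≠ "" →
      pvRun lk (it :: rest) (PySem.Set.contains locked lk) (canon.getD lk "")
      = pvRun lk rest (PySem.Set.contains (pvStepB (canon, locked) it).2 lk)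
          ((pvStepB (canon, locked) it).1.getD lk "") := by
  have hWins : ∀ (sk : String), sk ≠ "" →
      (∀ k, (canon.insert (pvLinked it) sk).contains k
        = decide ((canon.insert (pvLinked it) sk).getD k "" ≠ "")) := by
    intro sk hsk k
    rw [PySem.Dict.contains_insert, PySem.Dict.getD_insert]
    by_cases hk : k = pvLinked it
    · simp [hk, hsk]
    · simp [hk, hW k]
  constructor
  · intro k
    unfold pvStepB
    split_ifs with h1 h2 h3
    · exact hW k
    · exact hWins (pvSkuOf it) h2.1 k
    · exact hWins (pvSkuOf it) h3.1 k
    · exact hW k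
  · intro lk rest hlk
    rw [pvRun_cons]
    by_cases hx : pvLinked it ≠ lk
    · -- items of another key leave both sides untouched
      have hne : ¬ (lk = pvLinked it) := fun e => hx e.symm
      have h2 : PySem.Set.contains (pvStepB (canon, locked) it).2 lk
          = PySem.Set.contains locked lk := by
        unfold pvStepB
        split_ifs <;>
          simp [PySem.Set.mem_add, hne]
      have h1 : (pvStepB (canon, locked) it).1.getD lk "" = canon.getD lk "" := by
        unfold pvStepB
        split_ifs <;> simp [PySem.Dict.getD_insert, hne]
      rw [if_pos hx, h1, h2]
    · have heq : pvLinked it = lk := not_not.mp hx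
      subst heq
      rw [if_neg hx]
      by_cases hL : PySem.Set.contains locked (pvLinked it) = true
      · have hst : pvStepB (canon, locked) it = (canon, locked) := by
          unfold pvStepB; rw [if_pos (Or.inr hL)]
        rw [if_pos hL, hst]
      · have hLf : PySem.Set.contains locked (pvLinked it) = false :=
          Bool.not_eq_true _ ▸ Bool.eq_false_iff.mpr (fun h => hL h)
        rw [if_neg hL]
        by_cases hb : pvSkuOf it ≠ "" ∧ (PySem.Dict.mk it).contains "en" = true
        · have hst : pvStepB (canon, locked) it
              = (canon.insert (pvLinked it) (pvSkuOf it), PySem.Set.add locked (pvLinked it)) := by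
            unfold pvStepB
            rw [if_neg (by rintro (h | h); exacts [hlk h, hL h]), if_pos hb]
          rw [if_pos hb, hst]
          have hca : PySem.Set.contains (PySem.Set.add locked (pvLinked it)) (pvLinked it) = true := by
            simp [PySem.Set.mem_add]
          rw [hca, PySem.Dict.getD_insert_self]
        · rw [if_neg hb]
          by_cases hc2 : pvSkuOf it ≠ "" ∧ canon.contains (pvLinked it) = false
          · have hst : pvStepB (canon, locked) it
                = (canon.insert (pvLinked it) (pvSkuOf it), locked) := by
              unfold pvStepB
              rw [if_neg (by rintro (h | h); exacts [hlk h, hL h]), if_neg hb, if_pos hc2]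
            have hv : canon.getD (pvLinked it) "" = "" := by
              have h := hW (pvLinked it)
              rw [hc2.2] at h
              by_contra hc
              rw [decide_eq_true hc] at h
              exact Bool.false_ne_true h
            rw [if_pos ⟨hc2.1, hv⟩, hst, PySem.Dict.getD_insert_self]
            have h5 : pvLinked it ∉ locked := by simpa using hLf
            simp [h5]
          · have hst : pvStepB (canon, locked) it = (canon, locked) := by
              unfold pvStepB
              rw [if_neg (by rintro (h | h); exacts [hlk h, hL h]), if_neg hb, if_neg hc2]
            have hn4 : ¬ (pvSkuOf it ≠ "" ∧ canon.getD (pvLinked it) "" = "") := by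
              rintro ⟨hs, hv⟩
              apply hc2
              refine ⟨hs, ?_⟩
              rw [hW (pvLinked it), hv]
              simp
            rw [if_neg hn4, hst]

theorem pvB_invariant (l : List (List (String × String)))
    (canon : PySem.Dict String String) (locked : PySem.Set String)
    (hW : ∀ k, canon.contains k = decide (canon.getD k "" ≠ "")) :
    ∀ lk, lk ≠ "" →
      (l.foldl pvStepB (canon, locked)).1.getD lk ""
        = (pvRun lk l (PySem.Set.contains locked lk) (canon.getD lk "")).2 := by
  induction l generalizing canon locked with
  | nil => intro lk _; rfl
  | cons it rest ih =>
      intro lk hlk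
      obtain ⟨hW', hstep⟩ := pvStepB_run it canon locked hW
      rw [List.foldl_cons, hstep lk rest hlk]
      exact ih (pvStepB (canon, locked) it).1 (pvStepB (canon, locked) it).2 hW' lk hlk

theorem pvScanA_cons (it : List (String × String)) (g : List (List (String × String)))
    (c f : Option String) :
    pvScanA (it :: g) c f
    = (if (PySem.Dict.mk it).contains "en" ∧ (PySem.Dict.mk it).getD "sku" "" ≠ "" then
         ((some ((PySem.Dict.mk it).getD "sku" "")),
          (if f.getD "" = "" ∧ (PySem.Dict.mk it).getD "sku" "" ≠ "" then
             some ((PySem.Dict.mk it).getD "sku" "") else f))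
       else pvScanA g c
         (if f.getD "" = "" ∧ (PySem.Dict.mk it).getD "sku" "" ≠ "" then
            some ((PySem.Dict.mk it).getD "sku" "") else f)) := rfl

theorem pvRun_scan (lk : String) (l : List (List (String × String))) :
    ∀ f : Option String,
    pvRun lk l false (f.getD "")
    = (decide ((pvScanA (pvGroup l lk) none f).1.getD "" ≠ ""),
       if (pvScanA (pvGroup l lk) none f).1.getD "" ≠ "" then (pvScanA (pvGroup l lk) none f).1.getD ""
       else (pvScanA (pvGroup l lk) none f).2.getD "") := by
  induction l with
  | nil => intro f; rfl
  | cons it rest ih =>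
      intro f
      rw [pvRun_cons]
      by_cases hmem : pvLinked it = lk
      · have hgrp : pvGroup (it :: rest) lk = it :: pvGroup rest lk := by
          unfold pvGroup; rw [List.filter_cons, if_pos (by simpa using hmem)]
        rw [hgrp, pvScanA_cons, if_neg (fun hc => hc hmem), if_neg (Bool.false_ne_true)]
        by_cases hb : pvSkuOf it ≠ "" ∧ ((PySem.Dict.mk it).contains "en") = true
        · have hb' : ((PySem.Dict.mk it).contains "en") = true ∧ (PySem.Dict.mk it).getD "sku" "" ≠ "" :=
            ⟨hb.2, hb.1⟩
          rw [if_pos hb, if_pos hb', pvRun_locked]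
          have hbr : (PySem.Dict.mk it).getD "sku" "" ≠ "" := hb.1
          simp [pvSkuOf, hbr]
        · have hb' : ¬ (((PySem.Dict.mk it).contains "en") = true ∧ (PySem.Dict.mk it).getD "sku" "" ≠ "") :=
            fun hc => hb ⟨hc.2, hc.1⟩
          rw [if_neg hb, if_neg hb']
          by_cases h4 : pvSkuOf it ≠ "" ∧ f.getD "" = ""
          · have hfb : (if f.getD "" = "" ∧ (PySem.Dict.mk it).getD "sku" "" ≠ "" then
                some ((PySem.Dict.mk it).getD "sku" "") else f) = some (pvSkuOf it) := by
              rw [if_pos ⟨h4.2, h4.1⟩]; rfl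
            rw [if_pos h4, hfb]
            have := ih (some (pvSkuOf it))
            rw [Option.getD_some] at this
            exact this
          · have hfb : (if f.getD "" = "" ∧ (PySem.Dict.mk it).getD "sku" "" ≠ "" then
                some ((PySem.Dict.mk it).getD "sku" "") else f) = f := by
              rw [if_neg (fun hc => h4 ⟨hc.2, hc.1⟩)]
            rw [if_neg h4, hfb]
            exact ih f
      · have hgrp : pvGroup (it :: rest) lk = pvGroup rest lk := by
          unfold pvGroup; rw [List.filter_cons, if_neg (by simpa using hmem)]
        rw [hgrp, if_pos hmem]
        exact ih f

theorem pvB_eq_specmap (items : List (List (String × String))) :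
    normalize_sku_across_translations_py_alt items = items.map (pvF items) := by
  rw [pvB_unfold]
  apply List.map_congr_left
  intro it _
  have hW0 : ∀ k, (PySem.Dict.empty : PySem.Dict String String).contains k
      = decide ((PySem.Dict.empty : PySem.Dict String String).getD k "" ≠ "") := by
    intro k
    rw [PySem.Dict.contains_empty, PySem.Dict.getD_empty]
    simp
  unfold pvF
  by_cases h0 : pvLinked it = ""
  · rw [if_neg (by rintro ⟨h1, _⟩; exact h1 h0), if_neg (by rintro ⟨h1, _⟩; exact h1 h0)]
  · have hg : (items.foldl pvStepB (PySem.Dict.empty, PySem.Set.empty)).1.getD (pvLinked it) ""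
        = pvCS items (pvLinked it) := by
      rw [pvB_invariant items PySem.Dict.empty PySem.Set.empty hW0 (pvLinked it) h0]
      have hc0 : PySem.Set.contains (PySem.Set.empty : PySem.Set String) (pvLinked it) = false := rfl
      have hd0 : (PySem.Dict.empty : PySem.Dict String String).getD (pvLinked it) ""
          = (none : Option String).getD "" := rfl
      rw [hc0, hd0, pvRun_scan (pvLinked it) items none]
      rfl
    show (if pvLinked it ≠ "" ∧
            (items.foldl pvStepB (PySem.Dict.empty, PySem.Set.empty)).1.getD (pvLinked it) "" ≠ "" then
          pvSetSku it ((items.foldl pvStepB (PySem.Dict.empty, PySem.Set.empty)).1.getD (pvLinked it) "")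
        else it) = _
    rw [hg]
  

-- ===== VERDICT (by name: the statement is the Claim_ definition above) =====
theorem normalize_sku_across_translations_py_spec : Claim_equal_normalize_sku_across_translations_py := by
  intro items _
  show normalize_sku_across_translations_py items = normalize_sku_across_translations_py_alt items
  rw [pvA_eq_specmap, pvB_eq_specmap]
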